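-- pv_equiv track=rewrite | github.com/imandadras/zed | Resnet20/preprocess/ms_util/input_gen.py | gen_row_active
-- ===== SOURCE A (Python) =====
-- def gen_row_active(start_r, range_r, batch_size, batch_num, v=63):
--     ig=[]
--     start_r2 = start_r
--     if 383<(start_r)<512:
--         start_r2=512+(start_r-384)
--     if 511<start_r<896:
--         start_r2= start_r+128
--     if 895<start_r<1024:
--         start_r2=1024+128+(start_r-896)
--     if 1023<start_r:
--         start_r2= start_r+256
--     start_r = start_r2
--     end_r = start_r + range_r
--     end_r2 = end_r
--     if 383<(end_r)<512:
--         end_r2=512+(end_r-384)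
--     if 511<end_r<896:
--         end_r2= end_r+128
--     if 895<end_r<1024:
--         end_r2=1024+128+(end_r-896)
--     if 1023<end_r:
--         end_r2= end_r+256
--     end_r=end_r2
--
--
--     if 383<(end_r%383)<512:
--         end_r=(((end_r//383)+1)*640)+(end_r%383)
--
--     print (start_r,end_r)
--     for _ in range(batch_num):
--         for i in range(batch_size):
--             if (i>=start_r and i<end_r):
--                 ig.append(v)
--             else:
--                 ig.append(0)
--     return ig
-- ===== SOURCE B (Python) =====
-- def gen_row_active(start_r, range_r, batch_size, batch_num, v=63):
--     # Same remapping as A's cascade, written as one closed-form offset function;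
--     # the row is built from three computed segment lengths and replicated.
--     def remap(x):
--         return x if x < 384 else x + 128 if x < 896 else x + 256
--     start_r = remap(start_r)
--     end_r = remap(start_r + range_r)
--     print(start_r, end_r)
--     lo = max(0, min(start_r, batch_size))
--     hi = max(lo, min(end_r, batch_size))
--     row = [0] * lo + [v] * (hi - lo) + [0] * (batch_size - hi)
--     return row * batch_num
-- ===== Notes on version B (the rewrite author's own statement) =====
-- stated objective: faster
-- what changed: Replaces the four sequential range-shift ifs by one closed-form offset helper and replaces the per-element nested scan (batch_num*batch_size comparisons) by building one row from three computed segment lengths and replicating it with list multiplication.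
import Mathlib
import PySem

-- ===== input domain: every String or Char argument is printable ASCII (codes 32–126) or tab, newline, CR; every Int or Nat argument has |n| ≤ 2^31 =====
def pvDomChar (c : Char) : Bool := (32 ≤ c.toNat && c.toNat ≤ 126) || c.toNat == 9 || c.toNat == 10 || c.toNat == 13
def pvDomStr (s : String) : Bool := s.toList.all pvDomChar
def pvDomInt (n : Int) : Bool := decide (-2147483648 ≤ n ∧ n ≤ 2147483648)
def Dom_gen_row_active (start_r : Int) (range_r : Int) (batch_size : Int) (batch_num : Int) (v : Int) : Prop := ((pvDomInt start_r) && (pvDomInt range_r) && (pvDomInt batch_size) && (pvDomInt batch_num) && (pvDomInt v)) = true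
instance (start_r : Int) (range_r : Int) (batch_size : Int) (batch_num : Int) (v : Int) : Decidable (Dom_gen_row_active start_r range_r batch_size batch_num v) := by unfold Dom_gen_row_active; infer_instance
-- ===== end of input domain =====

-- B replaces the four sequential range-shift ifs by one closed-form offset
-- helper and builds the row from three computed segment lengths, replicated —
-- no per-element comparisons. A's print is a side effect; equivalence is on
-- the return value (B performs the same print in Python).

-- ===== PORT A =====
def gen_row_active (start_r : Int) (range_r : Int) (batch_size : Int) (batch_num : Int) (v : Int) : List Int :=
  let start_r2 := start_r
  let start_r2 := if 383 < start_r ∧ start_r < 512 then 512 + (start_r - 384) else start_r2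
  let start_r2 := if 511 < start_r ∧ start_r < 896 then start_r + 128 else start_r2
  let start_r2 := if 895 < start_r ∧ start_r < 1024 then 1024 + 128 + (start_r - 896) else start_r2
  let start_r2 := if 1023 < start_r then start_r + 256 else start_r2
  let start_r := start_r2
  let end_r := start_r + range_r
  let end_r2 := end_r
  let end_r2 := if 383 < end_r ∧ end_r < 512 then 512 + (end_r - 384) else end_r2
  let end_r2 := if 511 < end_r ∧ end_r < 896 then end_r + 128 else end_r2
  let end_r2 := if 895 < end_r ∧ end_r < 1024 then 1024 + 128 + (end_r - 896) else end_r2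
  let end_r2 := if 1023 < end_r then end_r + 256 else end_r2
  let end_r := end_r2
  let end_r := if 383 < PySem.Int.mod end_r 383 ∧ PySem.Int.mod end_r 383 < 512 then
      ((PySem.Int.floordiv end_r 383) + 1) * 640 + PySem.Int.mod end_r 383 else end_r
  (PySem.List.pyRange 0 batch_num 1).foldl (fun ig _ =>
    (PySem.List.pyRange 0 batch_size 1).foldl (fun ig i =>
      if i ≥ start_r ∧ i < end_r then ig ++ [v] else ig ++ [0]) ig) []

-- ===== PORT B =====
def pvRemap (x : Int) : Int := if x < 384 then x else if x < 896 then x + 128 else x + 256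

def gen_row_active_alt (start_r : Int) (range_r : Int) (batch_size : Int) (batch_num : Int) (v : Int) : List Int :=
  let s := pvRemap start_r
  let e := pvRemap (s + range_r)
  let lo := max 0 (min s batch_size)
  let hi := max lo (min e batch_size)
  let row := List.replicate lo.toNat 0 ++ List.replicate (hi - lo).toNat v ++ List.replicate (batch_size - hi).toNat 0
  (List.replicate batch_num.toNat row).flatten

-- ===== PRECONDITION & SPEC =====
def Spec_gen_row_active (start_r : Int) (range_r : Int) (batch_size : Int) (batch_num : Int) (v : Int) (out : List Int) : Prop := out = gen_row_active_alt start_r range_r batch_size batch_num v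
instance (start_r : Int) (range_r : Int) (batch_size : Int) (batch_num : Int) (v : Int) (out : List Int) : Decidable (Spec_gen_row_active start_r range_r batch_size batch_num v out) := by unfold Spec_gen_row_active; infer_instance

-- ===== CLAIM (what is proved, stated in full; the proofs are below) =====
def Claim_equal_gen_row_active : Prop := ∀ (start_r : Int) (range_r : Int) (batch_size : Int) (batch_num : Int) (v : Int), Dom_gen_row_active start_r range_r batch_size batch_num v → Spec_gen_row_active start_r range_r batch_size batch_num v (gen_row_active start_r range_r batch_size batch_num v)

-- ===== LEMMAS AND PROOFS =====

-- A's 383<x<512 / 511<x<896 / 895<x<1024 / 1023<x cascade equals the closed-form offset.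
theorem pv_cascade_eq_remap (x : Int) :
    (if 1023 < x then x + 256 else
      if 895 < x ∧ x < 1024 then 1024 + 128 + (x - 896) else
        if 511 < x ∧ x < 896 then x + 128 else
          if 383 < x ∧ x < 512 then 512 + (x - 384) else x) = pvRemap x := by
  unfold pvRemap; split_ifs <;> omega

-- the 'if 383 < end_r % 383 < 512' branch is dead: end_r % 383 < 383
theorem pv_mod_branch_dead (e : Int) :
    ¬ (383 < PySem.Int.mod e 383 ∧ PySem.Int.mod e 383 < 512) := by
  rw [PySem.Int.mod_eq_emod_of_pos (by norm_num : (0:Int) < 383)]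
  have := Int.emod_lt_of_pos e (b := 383) (by norm_num)
  omega

theorem pv_outer_fold (row : List Int) (l : List Int) (init : List Int) :
    l.foldl (fun acc _ => acc ++ row) init = init ++ (List.replicate l.length row).flatten := by
  induction l generalizing init with
  | nil => simp
  | cons h t ih => simp [List.foldl_cons, ih, List.replicate_succ, List.append_assoc]

theorem pv_row_eq (s e bs v : Int) :
    (PySem.List.pyRange 0 bs 1).map (fun i => if s ≤ i ∧ i < e then v else (0 : Int)) =
      List.replicate (max 0 (min s bs)).toNat 0 ++
        List.replicate (max (max 0 (min s bs)) (min e bs) - max 0 (min s bs)).toNat v ++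
        List.replicate (bs - max (max 0 (min s bs)) (min e bs)).toNat 0 := by
  set lo := max 0 (min s bs) with hlo
  set hi := max lo (min e bs) with hhi
  by_cases hbs : bs ≤ 0
  · have h1 : lo = 0 := by omega
    have h2 : hi = 0 := by omega
    rw [PySem.List.pyRange_one_eq_nil (by omega), h1, h2]
    simp
    omega
  · have hsplit : PySem.List.pyRange 0 bs 1 =
        PySem.List.pyRange 0 lo 1 ++ PySem.List.pyRange lo hi 1 ++ PySem.List.pyRange hi bs 1 := by
      rw [PySem.List.pyRange_one_append 0 lo bs (by omega) (by omega),
        PySem.List.pyRange_one_append lo hi bs (by omega) (by omega), List.append_assoc]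
    rw [hsplit]
    simp only [List.map_append]
    congr 1
    · congr 1
      · rw [List.map_congr_left (g := fun _ => (0 : Int)) ?_, List.map_const',
          PySem.List.length_pyRange_one]
        · norm_num
        · intro i hi'
          rw [PySem.List.mem_pyRange_one] at hi'
          have : ¬ (s ≤ i ∧ i < e) := by omega
          simp [this]
      · rw [List.map_congr_left (g := fun _ => v) ?_, List.map_const',
          PySem.List.length_pyRange_one]
        intro i hi'
        rw [PySem.List.mem_pyRange_one] at hi'
        have : s ≤ i ∧ i < e := by omega
        simp [this]
    · rw [List.map_congr_left (g := fun _ => (0 : Int)) ?_, List.map_const',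
        PySem.List.length_pyRange_one]
      intro i hi'
      rw [PySem.List.mem_pyRange_one] at hi'
      have : ¬ (s ≤ i ∧ i < e) := by omega
      simp [this]

-- ===== VERDICT (by name: the statement is the Claim_ definition above) =====
theorem gen_row_active_spec : Claim_equal_gen_row_active := by
  intro start_r range_r batch_size batch_num v _
  unfold Spec_gen_row_active gen_row_active gen_row_active_alt
  simp only []
  -- collapse the two cascades into pvRemap and drop the dead mod branch
  rw [if_neg (pv_mod_branch_dead _)]
  have hc : ∀ x : Int,
      (if 1023 < x then x + 256 else
        if 895 < x ∧ x < 1024 then 1024 + 128 + (x - 896) else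
          if 511 < x ∧ x < 896 then x + 128 else
            if 383 < x ∧ x < 512 then 512 + (x - 384) else x) = pvRemap x := pv_cascade_eq_remap
  -- rewrite the lets: the A-side cascade values
  have hs : (if 1023 < start_r then start_r + 256 else
      if 895 < start_r ∧ start_r < 1024 then 1024 + 128 + (start_r - 896) else
        if 511 < start_r ∧ start_r < 896 then start_r + 128 else
          if 383 < start_r ∧ start_r < 512 then 512 + (start_r - 384) else start_r) = pvRemap start_r := hc start_r
  rw [hs]
  rw [hc (pvRemap start_r + range_r)]
  set s := pvRemap start_r
  set e := pvRemap (s + range_r)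
  -- inner loop is append of one mapped row; outer loop replicates it
  have hinner : ∀ ig : List Int,
      (PySem.List.pyRange 0 batch_size 1).foldl (fun ig i =>
        if i ≥ s ∧ i < e then ig ++ [v] else ig ++ [0]) ig =
      ig ++ (PySem.List.pyRange 0 batch_size 1).map (fun i => if s ≤ i ∧ i < e then v else 0) := by
    intro ig
    have := PySem.List.foldl_append_singleton_eq_map
      (l := PySem.List.pyRange 0 batch_size 1)
      (f := fun i => if s ≤ i ∧ i < e then v else (0 : Int)) (acc := ig)
    rw [← this]
    congr 1
    funext acc i
    by_cases h : s ≤ i ∧ i < e <;> simp [h, ge_iff_le]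
  simp only [hinner]
  rw [pv_outer_fold, List.nil_append, PySem.List.length_pyRange_one, pv_row_eq]
  norm_num
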